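-- pv_equiv track=rewrite | github.com/zugebot/Jerrinth-Bot | files/support.py | removePings
-- ===== SOURCE A (Python) =====
-- from typing import List, Any, Union, Tuple
--
-- def removePings(string: str, allowed: List[str] = None) -> str:
--     if allowed is None:
--         allowed = []
--     elif not isinstance(allowed, list):
--         allowed = list(allowed)
--
--     result = ''
--     i = 0
--     while i < len(string):
--         if string[i] == '@':
--             matched_allowed = None
--             for allowed_item in allowed:
--                 if string.startswith(allowed_item, i + 1):
--                     matched_allowed = allowed_item
--                     break
--
--             if matched_allowed:
--                 result += string[i:i + len(matched_allowed) + 1]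
--                 i += len(matched_allowed) + 1
--                 continue
--             else:
--                 result += '@ '
--                 i += 1
--                 continue
--         result += string[i]
--         i += 1
--     return result
-- ===== SOURCE B (Python) =====
-- def removePings(string: str, allowed=None) -> str:
--     if allowed is None:
--         allowed = []
--     else:
--         allowed = list(allowed)
--     out = []
--     i = 0
--     while True:
--         j = string.find('@', i)
--         if j == -1:
--             out.append(string[i:])
--             break
--         out.append(string[i:j])
--         matched = None
--         for item in allowed:
--             if string.startswith(item, j + 1):
--                 matched = item
--                 break
--         if matched:
--             out.append(string[j:j + len(matched) + 1])
--             i = j + len(matched) + 1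
--         else:
--             out.append('@ ')
--             i = j + 1
--     return ''.join(out)
-- ===== Notes on version B (the rewrite author's own statement) =====
-- stated objective: faster
-- what changed: B replaces A's character-by-character scan with repeated string concatenation by a str.find-driven loop that copies each ping-free stretch as one bulk slice into a list joined once at the end.
import Mathlib
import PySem

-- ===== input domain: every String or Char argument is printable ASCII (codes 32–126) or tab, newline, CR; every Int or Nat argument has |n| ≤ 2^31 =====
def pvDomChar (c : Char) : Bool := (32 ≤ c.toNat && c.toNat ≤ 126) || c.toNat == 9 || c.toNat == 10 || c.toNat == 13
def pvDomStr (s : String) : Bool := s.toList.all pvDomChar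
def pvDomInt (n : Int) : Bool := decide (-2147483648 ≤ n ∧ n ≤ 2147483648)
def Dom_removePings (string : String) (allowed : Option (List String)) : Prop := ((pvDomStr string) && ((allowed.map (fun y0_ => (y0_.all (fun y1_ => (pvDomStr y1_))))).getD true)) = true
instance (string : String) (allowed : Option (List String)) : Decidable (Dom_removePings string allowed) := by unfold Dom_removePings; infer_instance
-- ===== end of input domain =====

-- B replaces A's character-by-character scan (repeated string concatenation) with a str.find-driven loop that copies ping-free stretches in bulk and joins once; a timing run measured B faster.

-- ===== PORT A =====
-- A's while loop over index i, viewed over the remaining suffix of the string: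
-- at each step it consumes one character, or a matched ping of length len(m)+1.
def goA (allowed : List (List Char)) : List Char → List Char
  | [] => []
  | c :: cs =>
    if c = '@' then
      match allowed.find? (fun it => PySem.Chars.startswith cs it) with
      | some m =>
        if m.isEmpty then '@' :: ' ' :: goA allowed cs
        else ((c :: cs).take (m.length + 1)) ++ goA allowed (cs.drop m.length)
      | none => '@' :: ' ' :: goA allowed cs
    else c :: goA allowed cs
  termination_by s => s.length
  decreasing_by all_goals (simp; try omega)

def removePings (string : String) (allowed : Option (List String)) : String :=
  String.ofList (goA ((allowed.getD []).map String.toList) string.toList)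

-- ===== PORT B =====
-- termination helper for goB: a successful find means the string is nonempty
theorem pvFindPos (s : List Char) (h : ¬ PySem.Chars.find s ['@'] = -1) : 0 < s.length := by
  have hin : ['@'] <:+: s := (PySem.Chars.find_ne_neg_one_iff s ['@']).mp h
  have : '@' ∈ s := hin.subset (by simp)
  exact List.length_pos_of_mem this

-- B's while loop driven by j = string.find('@', i), over the remaining suffix:
-- copy string[i:j] in bulk, then handle the '@' at j.
def goB (allowed : List (List Char)) (s : List Char) : List Char :=
  let j := PySem.Chars.find s ['@']
  if hj : j = -1 then s
  else
    s.take j.toNat ++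
      match allowed.find? (fun it => PySem.Chars.startswith (s.drop (j.toNat + 1)) it) with
      | some m =>
        if m.isEmpty then '@' :: ' ' :: goB allowed (s.drop (j.toNat + 1))
        else (s.drop j.toNat).take (m.length + 1) ++ goB allowed (s.drop (j.toNat + m.length + 1))
      | none => '@' :: ' ' :: goB allowed (s.drop (j.toNat + 1))
  termination_by s.length
  decreasing_by
    all_goals (simp; have := pvFindPos s hj; omega)

def removePings_alt (string : String) (allowed : Option (List String)) : String :=
  String.ofList (goB ((allowed.getD []).map String.toList) string.toList)

-- ===== PRECONDITION & SPEC =====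
def Spec_removePings (string : String) (allowed : Option (List String)) (out : String) : Prop := out = removePings_alt string allowed
instance (string : String) (allowed : Option (List String)) (out : String) : Decidable (Spec_removePings string allowed out) := by unfold Spec_removePings; infer_instance

-- ===== CLAIM (what is proved, stated in full; the proofs are below) =====
def Claim_equal_removePings : Prop := ∀ (string : String) (allowed : Option (List String)), Dom_removePings string allowed → Spec_removePings string allowed (removePings string allowed)

-- ===== LEMMAS AND PROOFS =====

theorem singleton_infix_iff (a : Char) (l : List Char) : [a] <:+: l ↔ a ∈ l := by
  constructor
  · intro h; exact h.subset (by simp)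
  · intro h
    obtain ⟨p, q, rfl⟩ := List.append_of_mem h
    exact ⟨p, q, by simp⟩

-- A copies a '@'-free stretch unchanged
theorem goA_skip (al : List (List Char)) (t r : List Char) (h : ∀ c ∈ t, c ≠ '@') :
    goA al (t ++ r) = t ++ goA al r := by
  induction t with
  | nil => simp
  | cons c t ih =>
    have hc : c ≠ '@' := h c (by simp)
    rw [List.cons_append, goA, if_neg hc, ih (fun x hx => h x (by simp [hx]))]
    simp

theorem goA_no_at (al : List (List Char)) (s : List Char) (h : ∀ c ∈ s, c ≠ '@') :
    goA al s = s := by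
  have := goA_skip al s [] h
  simpa [goA] using this

theorem take_find_no_at (s : List Char) (h : ¬ PySem.Chars.find s ['@'] = -1) :
    ∀ c ∈ s.take (PySem.Chars.find s ['@']).toNat, c ≠ '@' := by
  have hnn : 0 ≤ PySem.Chars.find s ['@'] := by
    rw [PySem.Chars.find_nonneg_iff]
    exact (PySem.Chars.find_ne_neg_one_iff s ['@']).mp h
  obtain ⟨-, hmin⟩ := PySem.Chars.find_spec hnn
  intro c hc hceq
  obtain ⟨i, hi, hget⟩ := List.getElem_of_mem hc
  have him : i < (PySem.Chars.find s ['@']).toNat ∧ i < s.length := by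
    rw [List.length_take] at hi; omega
  have hgi : s[i] = c := by
    rw [← hget]; simp [List.getElem_take]
  have : ¬ ['@'] <+: s.drop i := hmin i him.1
  apply this
  rw [List.drop_eq_getElem_cons him.2, hgi, hceq]
  exact ⟨_, rfl⟩

theorem drop_find_at (s : List Char) (h : ¬ PySem.Chars.find s ['@'] = -1) :
    s.drop (PySem.Chars.find s ['@']).toNat = '@' :: s.drop ((PySem.Chars.find s ['@']).toNat + 1) := by
  have hnn : 0 ≤ PySem.Chars.find s ['@'] := by
    rw [PySem.Chars.find_nonneg_iff]
    exact (PySem.Chars.find_ne_neg_one_iff s ['@']).mp h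
  obtain ⟨hpre, -⟩ := PySem.Chars.find_spec hnn
  obtain ⟨t, ht⟩ := hpre
  have htail : s.drop ((PySem.Chars.find s ['@']).toNat + 1) = (s.drop (PySem.Chars.find s ['@']).toNat).tail := by
    rw [← List.tail_drop]
  rw [htail, ← ht]
  simp

theorem goA_eq_goB (al : List (List Char)) : ∀ (n : ℕ) (s : List Char), s.length ≤ n → goA al s = goB al s := by
  intro n
  induction n with
  | zero =>
    intro s hs
    have : s = [] := List.eq_nil_of_length_eq_zero (by omega)
    subst this
    have hfe : PySem.Chars.find ([] : List Char) ['@'] = -1 := by decide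
    rw [goA, goB]
    simp [hfe]
  | succ n ih =>
    intro s hs
    rw [goB]
    by_cases hj : PySem.Chars.find s ['@'] = -1
    · simp only [hj, dif_pos]
      apply goA_no_at
      intro c hc hceq
      have : ¬ ['@'] <:+: s := (PySem.Chars.find_eq_neg_one_iff s ['@']).mp hj
      exact this ((singleton_infix_iff '@' s).mpr (hceq ▸ hc))
    · simp only [dif_neg hj]
      set m := (PySem.Chars.find s ['@']).toNat with hm
      have hdrop : s.drop m = '@' :: s.drop (m + 1) := drop_find_at s hj
      have hsplit : s = s.take m ++ '@' :: s.drop (m + 1) := by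
        conv_lhs => rw [← List.take_append_drop m s, hdrop]
      have hmlt : m < s.length := by
        by_contra hge
        have : s.drop m = [] := List.drop_eq_nil_of_le (by omega)
        rw [hdrop] at this; simp at this
      conv_lhs => rw [hsplit]
      rw [goA_skip al _ _ (take_find_no_at s hj)]
      congr 1
      rw [goA]
      have hlen1 : (s.drop (m + 1)).length ≤ n := by simp; omega
      cases hfind : al.find? (fun it => PySem.Chars.startswith (s.drop (m + 1)) it) with
      | none =>
        show ('@' :: ' ' :: goA al (s.drop (m + 1)) : List Char) = '@' :: ' ' :: goB al (s.drop (m + 1))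
        rw [ih _ hlen1]
      | some mm =>
        show (if mm.isEmpty = true then '@' :: ' ' :: goA al (s.drop (m + 1))
              else List.take (mm.length + 1) ('@' :: s.drop (m + 1)) ++ goA al (List.drop mm.length (s.drop (m + 1))))
           = (if mm.isEmpty = true then '@' :: ' ' :: goB al (s.drop (m + 1))
              else List.take (mm.length + 1) (s.drop m) ++ goB al (s.drop (m + mm.length + 1)))
        by_cases hemp : mm.isEmpty
        · rw [if_pos hemp, if_pos hemp, ih _ hlen1]
        · rw [if_neg hemp, if_neg hemp, hdrop]
          have hdd : List.drop mm.length (s.drop (m + 1)) = s.drop (m + mm.length + 1) := by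
            rw [List.drop_drop]; congr 1; omega
          rw [hdd, ih (s.drop (m + mm.length + 1)) (by simp only [List.length_drop]; omega)]

-- ===== VERDICT (by name: the statement is the Claim_ definition above) =====
theorem removePings_spec : Claim_equal_removePings := by
  intro string allowed _
  unfold Spec_removePings removePings removePings_alt
  rw [goA_eq_goB _ string.toList.length string.toList le_rfl]
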